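-- pv_equiv track=rewrite | github.com/JSerwatka/Idea-Bag-2 | Text_zadania/text_31.py | scooby_doo
-- ===== SOURCE A (Python) =====
-- vowels = "aeouiy"
--
-- def scooby_doo(string: str) -> list:
--     words = string.split(" ")
--
--     for i in range(len(words)):
--         for j in range(len(words[i])):
--             if words[i][j] in vowels:
--                 words[i] = "r" + words[i][j:]
--                 break
--
--     return words
-- ===== SOURCE B (Python) =====
-- import re
--
-- _PREFIX = re.compile(r'^[^aeouiy]*(?=[aeouiy])')
--
-- def scooby_doo(string: str) -> list:
--     return [_PREFIX.sub('r', word) for word in string.split(" ")]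
-- ===== Notes on version B (the rewrite author's own statement) =====
-- stated objective: idiomatic
-- what changed: The mutating index loops with an explicit first-vowel scan and break are replaced by a single list comprehension applying one anchored regex substitution (collapse the leading non-vowel run to 'r' only when a vowel follows) to each word.
import Mathlib
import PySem

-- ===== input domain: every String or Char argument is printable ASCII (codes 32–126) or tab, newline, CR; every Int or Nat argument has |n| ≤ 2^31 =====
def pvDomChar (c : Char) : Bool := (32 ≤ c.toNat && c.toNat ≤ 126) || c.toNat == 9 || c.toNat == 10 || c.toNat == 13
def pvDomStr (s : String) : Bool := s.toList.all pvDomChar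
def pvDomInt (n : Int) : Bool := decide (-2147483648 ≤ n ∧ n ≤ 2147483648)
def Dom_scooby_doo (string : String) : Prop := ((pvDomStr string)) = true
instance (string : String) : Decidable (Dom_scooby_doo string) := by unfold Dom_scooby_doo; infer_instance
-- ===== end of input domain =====

-- B replaces A's mutating index loops and explicit first-vowel scan/break by one regex
-- substitution per split word (idiomatic; same cost).

-- ===== PORT A =====
-- vowels = "aeouiy"
def pvVowels : List Char := "aeouiy".toList

-- inner loop: for j in range(len(w)): if w[j] in vowels: w = "r" + w[j:]; break
-- transliterated on the word's characters; `orig` is the unmodified word (no vowel ⇒ unchanged)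
def pvScanA (orig : List Char) : List Char → List Char
  | [] => orig
  | c :: rest => if c ∈ pvVowels then 'r' :: c :: rest else pvScanA orig rest

def scooby_doo (string : String) : List String :=
  let words := (PySem.Str.split? string " ").getD []
  words.map (fun w => String.mk (pvScanA w.toList w.toList))

-- ===== PORT B =====
-- re.sub(r'^[^aeouiy]*(?=[aeouiy])', 'r', word): drop the leading run of non-vowels;
-- if a vowel follows, prepend 'r', else the word is unchanged (ported as the regex's meaning)
def pvSubB (w : String) : String :=
  let rest := w.toList.dropWhile (fun c => !(c ∈ "aeouiy".toList : Bool))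
  if rest.isEmpty then w else String.mk ('r' :: rest)

def scooby_doo_alt (string : String) : List String :=
  ((PySem.Str.split? string " ").getD []).map pvSubB

-- ===== PRECONDITION & SPEC =====
def Spec_scooby_doo (string : String) (out : List String) : Prop := out = scooby_doo_alt string
instance (string : String) (out : List String) : Decidable (Spec_scooby_doo string out) := by unfold Spec_scooby_doo; infer_instance

-- ===== CLAIM (what is proved, stated in full; the proofs are below) =====
def Claim_equal_scooby_doo : Prop := ∀ (string : String), Dom_scooby_doo string → Spec_scooby_doo string (scooby_doo string)

-- ===== LEMMAS AND PROOFS =====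

theorem pvScanA_eq_dropWhile (orig cs : List Char) :
    pvScanA orig cs =
      (if (cs.dropWhile (fun c => !(c ∈ pvVowels : Bool))).isEmpty then orig
       else 'r' :: cs.dropWhile (fun c => !(c ∈ pvVowels : Bool))) := by
  induction cs with
  | nil => simp [pvScanA]
  | cons c rest ih =>
    by_cases h : c ∈ pvVowels <;> simp [pvScanA, List.dropWhile, h, ih]

theorem pvWord_eq (w : String) : String.mk (pvScanA w.toList w.toList) = pvSubB w := by
  rw [pvScanA_eq_dropWhile]
  show _ = pvSubB w
  unfold pvSubB
  split_ifs with h <;> simp_all [pvVowels, String.mk]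

theorem scooby_doo_spec : Claim_equal_scooby_doo := by
  intro s _
  unfold Spec_scooby_doo scooby_doo scooby_doo_alt
  simp [pvWord_eq]
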